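-- pv_equiv track=rewrite | github.com/cemenenkoff/pythonomicon | src/interview/network_calls.py | findNetworkCalls
-- ===== SOURCE A (Python) =====
-- import bisect
--
-- def findNetworkCalls(reviews, counts):
--     # Step 1: Sort the reviews and precompute prefix sums
--     reviews.sort()
--     n = len(reviews)
--
--     prefix_sum = [0] * (n + 1)
--     for i in range(1, n + 1):
--         prefix_sum[i] = prefix_sum[i - 1] + reviews[i - 1]
--
--     result = []
--
--     # Step 2: Process each count using binary search and prefix sums
--     for count in counts:
--         # Find the position where count would fit in the sorted reviews array
--         pos = bisect.bisect_left(reviews, count)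
--
--         # Sum of reviews less than or equal to count
--         left_sum = prefix_sum[pos]
--         # Sum of reviews greater than count
--         right_sum = prefix_sum[n] - left_sum
--
--         # API calls to increase the left side reviews to count
--         increase_calls = count * pos - left_sum
--         # API calls to decrease the right side reviews to count
--         decrease_calls = right_sum - count * (n - pos)
--
--         total_calls = increase_calls + decrease_calls
--         result.append(total_calls)
--
--     return result
-- ===== SOURCE B (Python) =====
-- def findNetworkCalls(reviews, counts):
--     # Unlike the original, this does not sort `reviews` in place;
--     # the equivalence claimed is about the return value only.
--     return [sum(abs(count - r) for r in reviews) for count in counts]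
-- ===== Notes on version B (the rewrite author's own statement) =====
-- stated objective: simpler
-- what changed: Replaces the sort + prefix-sum table + per-count binary search by the direct one-liner sum(abs(count - r) for r in reviews) per count (the two are provably equal); B also leaves `reviews` unmutated where A sorts it in place (return value is what is proved equal).
import Mathlib
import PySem

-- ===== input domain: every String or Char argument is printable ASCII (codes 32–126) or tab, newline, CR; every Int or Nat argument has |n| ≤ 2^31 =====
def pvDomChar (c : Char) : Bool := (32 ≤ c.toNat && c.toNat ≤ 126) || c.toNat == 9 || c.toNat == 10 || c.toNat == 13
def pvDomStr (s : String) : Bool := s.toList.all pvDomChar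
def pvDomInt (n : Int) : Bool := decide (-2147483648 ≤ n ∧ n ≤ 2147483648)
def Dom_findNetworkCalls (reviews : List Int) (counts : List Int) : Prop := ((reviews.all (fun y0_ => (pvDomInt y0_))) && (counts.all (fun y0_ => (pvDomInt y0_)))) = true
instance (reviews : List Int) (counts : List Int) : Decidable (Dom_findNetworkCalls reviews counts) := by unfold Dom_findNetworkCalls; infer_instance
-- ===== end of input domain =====

-- B replaces A's sort + prefix sums + per-count binary search by the direct sum of |count - r|
-- over the reviews (objective: simpler). A sorts `reviews` in place, B does not mutate it;
-- the equivalence proved here is about the return value.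

-- ===== PORT A =====
-- the prefix_sum-filling loop: prefixAux rest acc = [acc+r₀, acc+r₀+r₁, …]
def prefixAux : List Int → Int → List Int
  | [], _ => []
  | r :: rest, acc => (acc + r) :: prefixAux rest (acc + r)

def findNetworkCalls (reviews : List Int) (counts : List Int) : List Int :=
  let rs := PySem.List.sorted reviews (fun x => x) false
  let n : Int := rs.length
  let prefixSum : List Int := 0 :: prefixAux rs 0
  counts.foldl (fun result c =>
    let pos : Nat := PySem.List.bisectLeft rs c
    let leftSum := prefixSum.getD pos 0
    let rightSum := prefixSum.getD rs.length 0 - leftSum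
    let increaseCalls := c * (pos : Int) - leftSum
    let decreaseCalls := rightSum - c * (n - (pos : Int))
    result ++ [increaseCalls + decreaseCalls]) []

-- ===== PORT B =====
def findNetworkCalls_alt (reviews : List Int) (counts : List Int) : List Int :=
  counts.map (fun c => reviews.foldl (fun acc r => acc + |c - r|) 0)

-- ===== PRECONDITION & SPEC =====
def Spec_findNetworkCalls (reviews : List Int) (counts : List Int) (out : List Int) : Prop := out = findNetworkCalls_alt reviews counts
instance (reviews : List Int) (counts : List Int) (out : List Int) : Decidable (Spec_findNetworkCalls reviews counts out) := by unfold Spec_findNetworkCalls; infer_instance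

-- ===== CLAIM (what is proved, stated in full; the proofs are below) =====
def Claim_equal_findNetworkCalls : Prop := ∀ (reviews : List Int) (counts : List Int), Dom_findNetworkCalls reviews counts → Spec_findNetworkCalls reviews counts (findNetworkCalls reviews counts)

-- ===== LEMMAS AND PROOFS =====

-- A's result-appending loop is a map
theorem foldl_snoc (g : Int → Int) : ∀ (cs : List Int) (acc : List Int),
    cs.foldl (fun res c => res ++ [g c]) acc = acc ++ cs.map g := by
  intro cs
  induction cs with
  | nil => intro acc; simp
  | cons c cs ih => intro acc; simp [List.foldl_cons, ih]

-- B's inner sum-loop is a mapped sum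
theorem foldl_add_map (f : Int → Int) : ∀ (L : List Int) (s : Int),
    L.foldl (fun a r => a + f r) s = s + (L.map f).sum := by
  intro L
  induction L with
  | nil => intro s; simp
  | cons x L ih => intro s; simp [List.foldl_cons, ih]; ring

theorem prefixAux_getD : ∀ (rs : List Int) (acc : Int) (k : Nat), k ≤ rs.length →
    (acc :: prefixAux rs acc).getD k 0 = acc + (rs.take k).sum := by
  intro rs
  induction rs with
  | nil =>
    intro acc k hk
    have : k = 0 := Nat.le_zero.mp hk
    subst this; simp
  | cons r rest ih =>
    intro acc k hk
    cases k with
    | zero => simp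
    | succ k =>
      have h := ih (acc + r) k (by simpa using hk)
      simp only [prefixAux, List.getD_cons_succ, List.take_succ_cons, List.sum_cons]
      rw [h]; ring

theorem sum_lt_abs (c : Int) : ∀ (L : List Int), (∀ x ∈ L, x < c) →
    c * (L.length : Int) - L.sum = (L.map (fun r => |c - r|)).sum := by
  intro L
  induction L with
  | nil => simp
  | cons x L ih =>
    intro h
    have hx : |c - x| = c - x := abs_of_nonneg (by have := h x (by simp); omega)
    have := ih (fun y hy => h y (by simp [hy]))
    simp only [List.map_cons, List.sum_cons, List.length_cons, List.sum_cons, hx]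
    push_cast
    linarith

theorem sum_ge_abs (c : Int) : ∀ (L : List Int), (∀ x ∈ L, c ≤ x) →
    L.sum - c * (L.length : Int) = (L.map (fun r => |c - r|)).sum := by
  intro L
  induction L with
  | nil => simp
  | cons x L ih =>
    intro h
    have hx : |c - x| = x - c := by
      rw [abs_of_nonpos (by have := h x (by simp); omega)]; ring
    have := ih (fun y hy => h y (by simp [hy]))
    simp only [List.map_cons, List.sum_cons, List.length_cons, List.sum_cons, hx]
    push_cast
    linarith

-- per-count value of A on the sorted list = sum of |c - r| over that list
theorem perCount_eq (rs : List Int) (hst : rs.Pairwise (· ≤ ·)) (c : Int) :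
    (let pos : Nat := PySem.List.bisectLeft rs c
     c * (pos : Int) - ((0 : Int) :: prefixAux rs 0).getD pos 0 +
       (((0 : Int) :: prefixAux rs 0).getD rs.length 0 - ((0 : Int) :: prefixAux rs 0).getD pos 0 -
         c * ((rs.length : Int) - (pos : Int)))) = (rs.map (fun r => |c - r|)).sum := by
  obtain ⟨hle, hlt, hge⟩ := PySem.List.bisectLeft_spec rs c hst
  set pos := PySem.List.bisectLeft rs c with hpos
  have hL : ∀ x ∈ rs.take pos, x < c := by
    intro x hx
    obtain ⟨j, hj, hval⟩ := List.mem_iff_getElem.mp hx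
    have hj' : j < pos := lt_of_lt_of_le hj (by simp)
    have hjlen : j < rs.length := lt_of_lt_of_le hj' hle
    have := hlt j hjlen hj'
    rw [List.getElem_take] at hval
    omega
  have hR : ∀ x ∈ rs.drop pos, c ≤ x := by
    intro x hx
    obtain ⟨j, hj, hval⟩ := List.mem_iff_getElem.mp hx
    have hjlen : pos + j < rs.length := by simp at hj; omega
    have := hge (pos + j) hjlen (by omega)
    rw [List.getElem_drop] at hval
    omega
  have h1 : ((0 : Int) :: prefixAux rs 0).getD pos 0 = (rs.take pos).sum := by
    simpa using prefixAux_getD rs 0 pos hle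
  have h2 : ((0 : Int) :: prefixAux rs 0).getD rs.length 0 = rs.sum := by
    simpa using prefixAux_getD rs 0 rs.length le_rfl
  have hsplit : rs.sum = (rs.take pos).sum + (rs.drop pos).sum := by
    conv_lhs => rw [← List.take_append_drop pos rs]
    simp
  have hlenL : (rs.take pos).length = pos := by simp [Nat.min_eq_left hle]
  have hlenR : (rs.drop pos).length = rs.length - pos := by simp
  have hmap : (rs.map (fun r => |c - r|)).sum =
      ((rs.take pos).map (fun r => |c - r|)).sum + ((rs.drop pos).map (fun r => |c - r|)).sum := by
    conv_lhs => rw [← List.take_append_drop pos rs]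
    simp
  have eL := sum_lt_abs c (rs.take pos) hL
  have eR := sum_ge_abs c (rs.drop pos) hR
  rw [hlenL] at eL
  rw [hlenR] at eR
  have hcast : ((rs.length - pos : Nat) : Int) = (rs.length : Int) - (pos : Int) := by
    omega
  rw [hcast] at eR
  simp only [h1, h2, hmap, hsplit]
  linarith

-- ===== VERDICT (by name: the statement is the Claim_ definition above) =====
theorem findNetworkCalls_spec : Claim_equal_findNetworkCalls := by
  intro reviews counts _
  unfold Spec_findNetworkCalls findNetworkCalls findNetworkCalls_alt
  simp only
  rw [foldl_snoc]
  simp only [List.nil_append]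
  apply List.map_congr_left
  intro c _
  rw [foldl_add_map]
  have hperm : (PySem.List.sorted reviews (fun x => x) false).Perm reviews :=
    PySem.List.sorted_perm reviews (fun x => x) false
  have hst : (PySem.List.sorted reviews (fun x => x) false).Pairwise (· ≤ ·) := by
    simpa using PySem.List.sorted_pairwise reviews (fun x => x)
  have := perCount_eq (PySem.List.sorted reviews (fun x => x) false) hst c
  simp only at this
  rw [this]
  have : ((PySem.List.sorted reviews (fun x => x) false).map (fun r => |c - r|)).Perm
      (reviews.map (fun r => |c - r|)) := hperm.map _
  simpa using this.sum_eq
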